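-- pv_equiv track=rewrite | github.com/adam147g/algorithms-and-data-structures | Laboratory/Dynamic/Edit Distance.py | fit_substring
-- ===== SOURCE A (Python) =====
-- def fit_substring(P, T):
--     if P[0] != ' ':
--         P = ' ' + P
--     if T[0] != ' ':
--         T = ' ' + T
--     i = len(P)
--     j = len(T)
--     D = [[0 for val in range(j)] for _ in range(i)]  # macierz ixj
--     for row in range(1, i):
--         D[row][0] = row
--     for ii in range(1, i):
--         for jj in range(1, j):
--             zamian = D[ii - 1][jj - 1] + (P[ii] != T[jj])
--             wstawi = D[ii][jj - 1] + 1
--             usunie = D[ii - 1][jj] + 1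
--             min_koszt = min(zamian, wstawi, usunie)
--             D[ii][jj] = min_koszt
--     i = len(P) - 1
--     j = 0
--     for k in range(1, len(T)):
--         if D[i][k] < D[i][j]:
--             j = k
--     return j - i  # zamiana indeksu konca na poczatek
-- ===== SOURCE B (Python) =====
-- def fit_substring(P, T):
--     # Top-down memoized recursion over the same edit-distance recurrence
--     # (cells computed on demand via a dict cache) instead of a bottom-up
--     # 2D table, then index(min(...)) over the last row for the first argmin.
--     if P[0] != ' ':
--         P = ' ' + P
--     if T[0] != ' ':
--         T = ' ' + T
--     memo = {}
--
--     def edit(i, j):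
--         key = (i, j)
--         if key in memo:
--             return memo[key]
--         if i == 0:
--             r = 0
--         elif j == 0:
--             r = i
--         else:
--             r = min(edit(i - 1, j - 1) + (P[i] != T[j]),
--                     edit(i, j - 1) + 1,
--                     edit(i - 1, j) + 1)
--         memo[key] = r
--         return r
--
--     m = len(P) - 1
--     last = [edit(m, k) for k in range(len(T))]
--     return last.index(min(last)) - m
-- ===== Notes on version B (the rewrite author's own statement) =====
-- stated objective: alternative
-- what changed: Replaced the bottom-up 2D DP table with top-down memoized recursion (a dict-cached recursive edit(i,j) computing cells on demand) and replaced the manual strict-< argmin loop with last.index(min(last)).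
import Mathlib
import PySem

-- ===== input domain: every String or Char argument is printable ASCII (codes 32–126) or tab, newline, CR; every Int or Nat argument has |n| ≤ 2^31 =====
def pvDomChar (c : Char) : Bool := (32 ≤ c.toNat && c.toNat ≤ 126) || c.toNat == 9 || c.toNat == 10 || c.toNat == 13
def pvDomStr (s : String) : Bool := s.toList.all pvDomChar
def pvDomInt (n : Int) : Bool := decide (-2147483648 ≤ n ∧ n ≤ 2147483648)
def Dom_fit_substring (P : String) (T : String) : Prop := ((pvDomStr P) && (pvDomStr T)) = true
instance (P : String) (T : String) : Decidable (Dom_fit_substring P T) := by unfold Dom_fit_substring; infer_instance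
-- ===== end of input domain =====

-- B replaces A's bottom-up 2D DP table with top-down memoized recursion (a dict-cached
-- edit(i,j)) and the manual strict-< argmin loop with index(min(...)) (objective: alternative).

-- ===== PORT A =====
-- Literal transliteration of A: full (len P)×(len T) matrix built by nested loops,
-- then a manual first-argmin scan.  All indices A uses are nonnegative and in range
-- (under Pre_), so the total forms pyGetD/pySetD are exact here.
def fit_substring (P : String) (T : String) : Int :=
  let Pc : List Char :=
    if PySem.List.pyGetD P.toList 0 ' ' ≠ ' ' then ' ' :: P.toList else P.toList
  let Tc : List Char :=
    if PySem.List.pyGetD T.toList 0 ' ' ≠ ' ' then ' ' :: T.toList else T.toList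
  let i : Int := Pc.length
  let j : Int := Tc.length
  let D : List (List Int) :=
    (PySem.List.pyRange 0 i 1).map (fun _ => (PySem.List.pyRange 0 j 1).map (fun _ => (0 : Int)))
  let D := (PySem.List.pyRange 1 i 1).foldl
    (fun D row => PySem.List.pySetD D row (PySem.List.pySetD (PySem.List.pyGetD D row []) 0 row)) D
  let D := (PySem.List.pyRange 1 i 1).foldl (fun D ii =>
    (PySem.List.pyRange 1 j 1).foldl (fun D jj =>
      let zamian := PySem.List.pyGetD (PySem.List.pyGetD D (ii - 1) []) (jj - 1) 0 +
        (if PySem.List.pyGetD Pc ii ' ' ≠ PySem.List.pyGetD Tc jj ' ' then (1 : Int) else 0)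
      let wstawi := PySem.List.pyGetD (PySem.List.pyGetD D ii []) (jj - 1) 0 + 1
      let usunie := PySem.List.pyGetD (PySem.List.pyGetD D (ii - 1) []) jj 0 + 1
      let min_koszt := min (min zamian wstawi) usunie
      PySem.List.pySetD D ii (PySem.List.pySetD (PySem.List.pyGetD D ii []) jj min_koszt)) D) D
  let i2 : Int := (Pc.length : Int) - 1
  let jf : Int := (PySem.List.pyRange 1 (Tc.length : Int) 1).foldl (fun jv k =>
    if PySem.List.pyGetD (PySem.List.pyGetD D i2 []) k 0 <
       PySem.List.pyGetD (PySem.List.pyGetD D i2 []) jv 0 then k else jv) 0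
  jf - i2

-- ===== PORT B =====
-- Literal transliteration of Source B's nested `edit(i, j)`: dict-cached recursion, the
-- memo threaded through.  `edit` is only ever reached with 0 ≤ i < len(P) and
-- 0 ≤ j < len(T) (the Python keys are those Nats), so Nat indices and List.getD
-- are exact for the P[i] / T[j] accesses here.
def editMemo (Pc Tc : List Char) (i j : Nat) (memo : PySem.Dict (Nat × Nat) Int) :
    PySem.Dict (Nat × Nat) Int × Int :=
  match memo.get? (i, j) with
  | some r => (memo, r)
  | none =>
    if hi : i = 0 then
      (memo.insert (i, j) 0, 0)
    else if hj : j = 0 then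
      (memo.insert (i, j) (i : Int), (i : Int))
    else
      let p1 := editMemo Pc Tc (i - 1) (j - 1) memo
      let p2 := editMemo Pc Tc i (j - 1) p1.1
      let p3 := editMemo Pc Tc (i - 1) j p2.1
      let r := min (min (p1.2 + (if Pc.getD i ' ' ≠ Tc.getD j ' ' then (1 : Int) else 0))
                        (p2.2 + 1)) (p3.2 + 1)
      (p3.1.insert (i, j) r, r)
  termination_by i + j
  decreasing_by all_goals omega

-- Source B: last = [edit(m, k) for k in range(len(T))]; return last.index(min(last)) - m
def fit_substring_alt (P : String) (T : String) : Int :=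
  let Pc : List Char :=
    if PySem.List.pyGetD P.toList 0 ' ' ≠ ' ' then ' ' :: P.toList else P.toList
  let Tc : List Char :=
    if PySem.List.pyGetD T.toList 0 ' ' ≠ ' ' then ' ' :: T.toList else T.toList
  let m : Nat := Pc.length - 1   -- Pc is nonempty under Pre_, so this is Python's len(P) - 1
  let last : List Int :=
    ((List.range Tc.length).foldl
      (fun st k =>
        let p := editMemo Pc Tc m k st.1
        (p.1, st.2 ++ [p.2]))
      ((PySem.Dict.empty : PySem.Dict (Nat × Nat) Int), ([] : List Int))).2
  let mn : Int := (PySem.List.min? last (fun x => x)).getD 0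
  (((PySem.List.index? last mn).getD 0 : Nat) : Int) - (m : Int)

-- ===== PRECONDITION & SPEC =====
-- Pre_: Python A evaluates P[0] and T[0], so it raises IndexError exactly when P or T is empty.
def Pre_fit_substring (P : String) (T : String) : Prop := P.toList ≠ [] ∧ T.toList ≠ []
instance (P : String) (T : String) : Decidable (Pre_fit_substring P T) := by
  unfold Pre_fit_substring; infer_instance
def pvWitness_fit_substring : String × String := ("kot", "ala ma kota")

def Spec_fit_substring (P : String) (T : String) (out : Int) : Prop := out = fit_substring_alt P T
instance (P : String) (T : String) (out : Int) : Decidable (Spec_fit_substring P T out) := by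
  unfold Spec_fit_substring; infer_instance

-- ===== CLAIM (what is proved, stated in full; the proofs are below) =====
def Claim_equal_fit_substring : Prop := ∀ (P : String) (T : String), Dom_fit_substring P T → Pre_fit_substring P T → Spec_fit_substring P T (fit_substring P T)

-- ===== LEMMAS AND PROOFS =====

-- The shared DP recurrence (value of cell (i,j) of A's matrix / B's memo).
def edCell (Pc Tc : List Char) : Nat → Nat → Int
  | 0, _ => 0
  | (i+1), 0 => (i : Int) + 1
  | (i+1), (j+1) =>
      let zamian := edCell Pc Tc i j +
        (if Pc.getD (i+1) ' ' ≠ Tc.getD (j+1) ' ' then (1 : Int) else 0)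
      let wstawi := edCell Pc Tc (i+1) j + 1
      let usunie := edCell Pc Tc i (j+1) + 1
      min (min zamian wstawi) usunie
  termination_by i j => (i, j)

def edRow (Pc Tc : List Char) (i n : Nat) : List Int :=
  (List.range n).map (fun j => edCell Pc Tc i j)

def initRowA (n s : Nat) : List Int := (List.replicate n (0:Int)).set 0 (s:Int)

def rowsA (Pc Tc : List Char) (m n r : Nat) : List (List Int) :=
  (List.range m).map (fun s => if s ≤ r then edRow Pc Tc s n else initRowA n s)

def partialRow (Pc Tc : List Char) (ii n c : Nat) : List Int :=
  (List.range c).map (fun j => edCell Pc Tc ii j) ++ List.replicate (n - c) 0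

-- bodies of the two ports after the shared space-prepend, abstracted over the char lists
def Abody (Pc Tc : List Char) : Int :=
  let i : Int := Pc.length
  let j : Int := Tc.length
  let D : List (List Int) :=
    (PySem.List.pyRange 0 i 1).map (fun _ => (PySem.List.pyRange 0 j 1).map (fun _ => (0 : Int)))
  let D := (PySem.List.pyRange 1 i 1).foldl
    (fun D row => PySem.List.pySetD D row (PySem.List.pySetD (PySem.List.pyGetD D row []) 0 row)) D
  let D := (PySem.List.pyRange 1 i 1).foldl (fun D ii =>
    (PySem.List.pyRange 1 j 1).foldl (fun D jj =>
      let zamian := PySem.List.pyGetD (PySem.List.pyGetD D (ii - 1) []) (jj - 1) 0 +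
        (if PySem.List.pyGetD Pc ii ' ' ≠ PySem.List.pyGetD Tc jj ' ' then (1 : Int) else 0)
      let wstawi := PySem.List.pyGetD (PySem.List.pyGetD D ii []) (jj - 1) 0 + 1
      let usunie := PySem.List.pyGetD (PySem.List.pyGetD D (ii - 1) []) jj 0 + 1
      let min_koszt := min (min zamian wstawi) usunie
      PySem.List.pySetD D ii (PySem.List.pySetD (PySem.List.pyGetD D ii []) jj min_koszt)) D) D
  let i2 : Int := (Pc.length : Int) - 1
  let jf : Int := (PySem.List.pyRange 1 (Tc.length : Int) 1).foldl (fun jv k =>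
    if PySem.List.pyGetD (PySem.List.pyGetD D i2 []) k 0 <
       PySem.List.pyGetD (PySem.List.pyGetD D i2 []) jv 0 then k else jv) 0
  jf - i2

def Bbody (Pc Tc : List Char) : Int :=
  let m : Nat := Pc.length - 1
  let last : List Int :=
    ((List.range Tc.length).foldl
      (fun st k =>
        let p := editMemo Pc Tc m k st.1
        (p.1, st.2 ++ [p.2]))
      ((PySem.Dict.empty : PySem.Dict (Nat × Nat) Int), ([] : List Int))).2
  let mn : Int := (PySem.List.min? last (fun x => x)).getD 0
  (((PySem.List.index? last mn).getD 0 : Nat) : Int) - (m : Int)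

lemma fitA (P T : String) : fit_substring P T =
    Abody (if PySem.List.pyGetD P.toList 0 ' ' ≠ ' ' then ' ' :: P.toList else P.toList)
          (if PySem.List.pyGetD T.toList 0 ' ' ≠ ' ' then ' ' :: T.toList else T.toList) := rfl

lemma fitB (P T : String) : fit_substring_alt P T =
    Bbody (if PySem.List.pyGetD P.toList 0 ' ' ≠ ' ' then ' ' :: P.toList else P.toList)
          (if PySem.List.pyGetD T.toList 0 ' ' ≠ ' ' then ' ' :: T.toList else T.toList) := rfl

lemma edCell_zero (Pc Tc : List Char) (j : Nat) : edCell Pc Tc 0 j = 0 := by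
  cases j <;> simp [edCell]

lemma edCell_base (Pc Tc : List Char) (i : Nat) : edCell Pc Tc (i+1) 0 = (i : Int) + 1 := by
  simp [edCell]

lemma edCell_step (Pc Tc : List Char) (i j : Nat) :
    edCell Pc Tc (i+1) (j+1) =
      min (min (edCell Pc Tc i j + (if Pc.getD (i+1) ' ' ≠ Tc.getD (j+1) ' ' then (1:Int) else 0))
               (edCell Pc Tc (i+1) j + 1))
          (edCell Pc Tc i (j+1) + 1) := by
  simp [edCell]

lemma edRow_zero (Pc Tc : List Char) (n : Nat) : edRow Pc Tc 0 n = List.replicate n 0 := by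
  unfold edRow
  rw [show (fun j => edCell Pc Tc 0 j) = (fun _ : Nat => (0:Int)) from funext (edCell_zero Pc Tc)]
  rw [List.map_const', List.length_range]

lemma length_edRow (Pc Tc : List Char) (i n : Nat) : (edRow Pc Tc i n).length = n := by
  simp [edRow]

lemma getD_edRow (Pc Tc : List Char) (i n t : Nat) (h : t < n) :
    (edRow Pc Tc i n).getD t 0 = edCell Pc Tc i t := by
  unfold edRow; exact PySem.List.getD_map_range _ _ _ _ h

lemma set_map_range {α : Type} (f g : Nat → α) (m k : Nat) (_hk : k < m) (v : α)
    (hfg : ∀ i, i ≠ k → f i = g i) (hv : g k = v) :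
    ((List.range m).map f).set k v = (List.range m).map g := by
  apply List.ext_getElem
  · simp
  · intro i h1 h2
    rw [List.getElem_set]
    simp only [List.getElem_map, List.getElem_range]
    split_ifs with h
    · rw [← h, hv]
    · exact hfg i (fun hik => h hik.symm)

lemma edCell_eq_min (Pc Tc : List Char) (ii c : Nat) (hii : 1 ≤ ii) (hc : 1 ≤ c) :
    edCell Pc Tc ii c =
      min (min (edCell Pc Tc (ii-1) (c-1) + (if Pc.getD ii ' ' ≠ Tc.getD c ' ' then (1:Int) else 0))
               (edCell Pc Tc ii (c-1) + 1))
          (edCell Pc Tc (ii-1) c + 1) := by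
  obtain ⟨i', rfl⟩ : ∃ i', ii = i' + 1 := ⟨ii - 1, by omega⟩
  obtain ⟨j', rfl⟩ : ∃ j', c = j' + 1 := ⟨c - 1, by omega⟩
  simp only [Nat.add_sub_cancel]
  exact edCell_step Pc Tc i' j'

lemma initRow_eq_partial (Pc Tc : List Char) (n ii : Nat) (hn : 1 ≤ n) (hii : 1 ≤ ii) :
    initRowA n ii = partialRow Pc Tc ii n 1 := by
  obtain ⟨k, rfl⟩ : ∃ k, n = k + 1 := ⟨n - 1, by omega⟩
  obtain ⟨i', rfl⟩ : ∃ i', ii = i' + 1 := ⟨ii - 1, by omega⟩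
  unfold initRowA partialRow
  rw [List.replicate_succ, List.set_cons_zero]
  simp [List.range_one, edCell_base]

lemma partial_full (Pc Tc : List Char) (ii n : Nat) :
    partialRow Pc Tc ii n n = edRow Pc Tc ii n := by
  unfold partialRow edRow
  simp

lemma partialRow_set (Pc Tc : List Char) (ii n c : Nat) (hcn : c < n) :
    (partialRow Pc Tc ii n c).set c (edCell Pc Tc ii c) = partialRow Pc Tc ii n (c+1) := by
  unfold partialRow
  rw [List.set_append]
  obtain ⟨w, hw⟩ : ∃ w, n - c = w + 1 := ⟨n - c - 1, by omega⟩
  simp only [List.length_map, List.length_range, lt_irrefl, Nat.sub_self]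
  rw [hw, List.replicate_succ, List.set_cons_zero]
  rw [List.range_succ, List.map_append, List.append_assoc]
  have : n - (c + 1) = w := by omega
  simp [this]

lemma L_init (m n : Nat) : ∀ c : Nat, c ≤ m →
    (PySem.List.pyRange 1 (c:Int) 1).foldl
      (fun D row => PySem.List.pySetD D row (PySem.List.pySetD (PySem.List.pyGetD D row []) 0 row))
      (List.replicate m (List.replicate n 0))
    = (List.range m).map (fun r => if r < c then initRowA n r else List.replicate n 0) := by
  intro c
  induction c with
  | zero =>
      intro _
      rw [PySem.List.pyRange_one_eq_nil (by norm_num)]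
      simp only [List.foldl_nil]
      rw [show (fun r : Nat => if r < 0 then initRowA n r else List.replicate n (0:Int))
            = (fun _ : Nat => List.replicate n (0:Int)) from funext (by intro r; simp)]
      rw [List.map_const', List.length_range]
  | succ c ih =>
      intro hc
      by_cases h0 : c = 0
      · subst h0
        rw [PySem.List.pyRange_one_eq_nil (by norm_num)]
        simp only [List.foldl_nil]
        rw [show (fun r : Nat => if r < 0 + 1 then initRowA n r else List.replicate n (0:Int))
              = (fun _ : Nat => List.replicate n (0:Int)) from funext (by
                intro r
                by_cases hr : r < 0 + 1
                · have : r = 0 := by omega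
                  subst this
                  simp [hr, initRowA, List.set_replicate_self]
                · simp [hr])]
        rw [List.map_const', List.length_range]
      · have hc1 : 1 ≤ c := by omega
        have hcast : ((c + 1 : Nat) : Int) = (c : Int) + 1 := by push_cast; ring
        rw [hcast, PySem.List.pyRange_one_succ_right (by exact_mod_cast hc1), List.foldl_append]
        rw [ih (by omega)]
        simp only [List.foldl_cons, List.foldl_nil]
        rw [PySem.List.pyGetD_natCast]
        rw [PySem.List.getD_map_range _ _ _ _ (show c < m by omega)]
        simp only [lt_irrefl]
        rw [PySem.List.pySetD_of_nonneg _ _ (by norm_num : (0:Int) ≤ 0)]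
        simp only [PySem.List.pySetD_natCast, Int.toNat_zero]
        exact set_map_range _ _ m c (by omega) _
          (fun i hik => by
            by_cases h : i < c
            · simp [h, show i < c + 1 by omega]
            · simp [h, show ¬ i < c + 1 by omega])
          (by simp [initRowA])

lemma L_rowsA0 (Pc Tc : List Char) (m n : Nat) :
    (List.range m).map (fun r => if r < m then initRowA n r else List.replicate n 0)
    = rowsA Pc Tc m n 0 := by
  unfold rowsA
  apply List.map_congr_left
  intro s hs
  rw [List.mem_range] at hs
  by_cases h0 : s = 0
  · subst h0
    simp [hs, initRowA, edRow_zero, List.set_replicate_self]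
  · have hns : ¬ s ≤ 0 := by omega
    simp [hs, hns]

lemma L_innerA (Pc Tc : List Char) (m n ii : Nat) (hn : 1 ≤ n) (hii : 1 ≤ ii) (him : ii < m) :
    ∀ c : Nat, 1 ≤ c → c ≤ n →
    (PySem.List.pyRange 1 (c:Int) 1).foldl (fun D jj =>
      let zamian := PySem.List.pyGetD (PySem.List.pyGetD D ((ii:Int) - 1) []) (jj - 1) 0 +
        (if PySem.List.pyGetD Pc (ii:Int) ' ' ≠ PySem.List.pyGetD Tc jj ' ' then (1 : Int) else 0)
      let wstawi := PySem.List.pyGetD (PySem.List.pyGetD D (ii:Int) []) (jj - 1) 0 + 1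
      let usunie := PySem.List.pyGetD (PySem.List.pyGetD D ((ii:Int) - 1) []) jj 0 + 1
      let min_koszt := min (min zamian wstawi) usunie
      PySem.List.pySetD D (ii:Int) (PySem.List.pySetD (PySem.List.pyGetD D (ii:Int) []) jj min_koszt))
      (rowsA Pc Tc m n (ii - 1))
    = (List.range m).map (fun s =>
        if s < ii then edRow Pc Tc s n
        else if s = ii then partialRow Pc Tc ii n c
        else initRowA n s) := by
  intro c
  induction c with
  | zero => intro h; omega
  | succ c ih =>
      intro _ hcn
      by_cases h0 : c = 0
      · subst h0
        rw [PySem.List.pyRange_one_eq_nil (by norm_num)]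
        simp only [List.foldl_nil]
        unfold rowsA
        apply List.map_congr_left
        intro s hs
        by_cases h1 : s < ii
        · simp [h1, show s ≤ ii - 1 by omega]
        · by_cases h2 : s = ii
          · subst h2
            simp [show ¬ s ≤ s - 1 by omega]
            exact initRow_eq_partial Pc Tc n s hn hii
          · simp [h1, h2, show ¬ s ≤ ii - 1 by omega]
      · have hc1 : 1 ≤ c := by omega
        have hcast : ((c + 1 : Nat) : Int) = (c : Int) + 1 := by push_cast; ring
        rw [hcast, PySem.List.pyRange_one_succ_right (by exact_mod_cast hc1), List.foldl_append]
        rw [ih (by omega) (by omega)]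
        simp only [List.foldl_cons, List.foldl_nil]
        have e1 : ((ii : Int) - 1) = ((ii - 1 : Nat) : Int) := by omega
        have e2 : ((c : Int) - 1) = ((c - 1 : Nat) : Int) := by omega
        rw [e1, e2]
        simp only [PySem.List.pyGetD_natCast]
        rw [PySem.List.getD_map_range _ _ _ _ (show ii - 1 < m by omega)]
        rw [PySem.List.getD_map_range _ _ _ _ (show ii < m by omega)]
        simp only [show ii - 1 < ii from by omega, if_pos, lt_irrefl, ite_false]
        rw [getD_edRow _ _ _ _ _ (show c - 1 < n by omega)]
        rw [getD_edRow _ _ _ _ _ (show c < n by omega)]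
        have hget : (partialRow Pc Tc ii n c).getD (c-1) 0 = edCell Pc Tc ii (c-1) := by
          unfold partialRow
          rw [List.getD_append _ _ _ _ (by simp; omega)]
          exact PySem.List.getD_map_range _ _ _ _ (by omega)
        rw [hget]
        simp only [PySem.List.pySetD_natCast]
        have hval : min (min (edCell Pc Tc (ii-1) (c-1) +
              (if Pc.getD ii ' ' ≠ Tc.getD c ' ' then (1:Int) else 0))
              (edCell Pc Tc ii (c-1) + 1)) (edCell Pc Tc (ii-1) c + 1) = edCell Pc Tc ii c :=
          (edCell_eq_min Pc Tc ii c hii hc1).symm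
        rw [hval, partialRow_set Pc Tc ii n c (by omega)]
        exact set_map_range _ _ m ii him _
          (fun s hsk => by
            by_cases h1 : s < ii
            · simp [h1]
            · simp [h1, hsk])
          (by simp)

lemma L_outerA (Pc Tc : List Char) (m n : Nat) (hn : 1 ≤ n) :
    ∀ c : Nat, 1 ≤ c → c ≤ m →
    (PySem.List.pyRange 1 (c:Int) 1).foldl (fun D ii =>
      (PySem.List.pyRange 1 (n:Int) 1).foldl (fun D jj =>
        let zamian := PySem.List.pyGetD (PySem.List.pyGetD D (ii - 1) []) (jj - 1) 0 +
          (if PySem.List.pyGetD Pc ii ' ' ≠ PySem.List.pyGetD Tc jj ' ' then (1 : Int) else 0)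
        let wstawi := PySem.List.pyGetD (PySem.List.pyGetD D ii []) (jj - 1) 0 + 1
        let usunie := PySem.List.pyGetD (PySem.List.pyGetD D (ii - 1) []) jj 0 + 1
        let min_koszt := min (min zamian wstawi) usunie
        PySem.List.pySetD D ii (PySem.List.pySetD (PySem.List.pyGetD D ii []) jj min_koszt)) D)
      (rowsA Pc Tc m n 0)
    = rowsA Pc Tc m n (c - 1) := by
  intro c
  induction c with
  | zero => intro h; omega
  | succ c ih =>
      intro _ hcm
      by_cases h0 : c = 0
      · subst h0
        rw [show ((0 + 1 : Nat) : Int) = 1 from by norm_num,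
          PySem.List.pyRange_one_eq_nil (le_refl (1:Int))]
        simp only [List.foldl_nil]
      · have hc1 : 1 ≤ c := by omega
        have hcast : ((c + 1 : Nat) : Int) = (c : Int) + 1 := by push_cast; ring
        rw [hcast, PySem.List.pyRange_one_succ_right (by exact_mod_cast hc1), List.foldl_append]
        rw [ih (by omega) (by omega)]
        simp only [List.foldl_cons, List.foldl_nil]
        have := L_innerA Pc Tc m n c hn hc1 (by omega) n hn (le_refl n)
        rw [this]
        unfold rowsA
        apply List.map_congr_left
        intro s hs
        by_cases h1 : s < c
        · have hsc : s ≤ c := by omega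
          simp [h1, hsc]
        · by_cases h2 : s = c
          · subst h2
            simp
            exact partial_full Pc Tc s n
          · have hsc : ¬ s ≤ c := by omega
            simp [h1, h2, hsc]

lemma L_argmin (xs : List Int) : ∀ c : Nat, 1 ≤ c → c ≤ xs.length →
    ∃ j : Nat, (PySem.List.pyRange 1 (c:Int) 1).foldl (fun jv k =>
        if PySem.List.pyGetD xs k 0 < PySem.List.pyGetD xs jv 0 then k else jv) 0 = (j:Int) ∧
      j < c ∧ (∀ t, t < c → xs.getD j 0 ≤ xs.getD t 0) ∧ (∀ t, t < j → xs.getD j 0 < xs.getD t 0) := by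
  intro c
  induction c with
  | zero => intro h; omega
  | succ c ih =>
      intro _ hlen
      by_cases h0 : c = 0
      · subst h0
        refine ⟨0, ?_, by omega, ?_, by omega⟩
        · rw [PySem.List.pyRange_one_eq_nil (by norm_num)]
          simp
        · intro t ht
          have : t = 0 := by omega
          subst this
          exact le_refl _
      · have hc1 : 1 ≤ c := by omega
        obtain ⟨j, hfold, hjc, hle, hlt⟩ := ih hc1 (by omega)
        have hcast : ((c + 1 : Nat) : Int) = (c : Int) + 1 := by push_cast; ring
        rw [hcast, PySem.List.pyRange_one_succ_right (by exact_mod_cast hc1), List.foldl_append]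
        rw [hfold]
        simp only [List.foldl_cons, List.foldl_nil, PySem.List.pyGetD_natCast]
        by_cases hcmp : xs.getD c 0 < xs.getD j 0
        · refine ⟨c, by rw [if_pos hcmp], by omega, ?_, ?_⟩
          · intro t ht
            by_cases h : t < c
            · exact le_of_lt (lt_of_lt_of_le hcmp (hle t h))
            · have : t = c := by omega
              subst this
              exact le_refl _
          · intro t ht
            exact lt_of_lt_of_le hcmp (hle t ht)
        · refine ⟨j, by rw [if_neg hcmp], by omega, ?_, hlt⟩
          intro t ht
          by_cases h : t < c
          · exact hle t h
          · have : t = c := by omega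
            subst this
            exact not_lt.mp hcmp

lemma L_index (xs : List Int) (j : Nat) (hj : j < xs.length)
    (hmin : ∀ t, t < xs.length → xs.getD j 0 ≤ xs.getD t 0)
    (hfirst : ∀ t, t < j → xs.getD j 0 < xs.getD t 0) :
    PySem.List.index? xs ((PySem.List.min? xs (fun x => x)).getD 0) = some j := by
  have hne : xs ≠ [] := by
    intro h
    subst h
    simp at hj
  obtain ⟨mn, hmn⟩ : ∃ mn, PySem.List.min? xs (fun x => x) = some mn := by
    cases h : PySem.List.min? xs (fun x => x) with
    | none => exact absurd ((PySem.List.min?_eq_none_iff xs _).mp h) hne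
    | some m => exact ⟨m, rfl⟩
  rw [hmn]
  simp only [Option.getD_some]
  have hmem := PySem.List.min?_mem hmn
  have hisMin := PySem.List.min?_isMin hmn
  have hgd : xs.getD j 0 = xs[j] := List.getD_eq_getElem xs 0 hj
  have hxj : xs[j] = mn := by
    apply le_antisymm
    · obtain ⟨t, ht, hteq⟩ := List.mem_iff_getElem.mp hmem
      have h2 := hmin t ht
      rw [hgd, List.getD_eq_getElem xs 0 ht, hteq] at h2
      exact h2
    · exact hisMin _ (List.getElem_mem hj)
  rw [PySem.List.index?_eq_some_iff]
  refine ⟨xs.take j, xs.drop (j+1), ?_, ?_, ?_⟩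
  · conv_lhs => rw [← List.take_append_drop j xs]
    congr 1
    rw [← hxj]
    exact (List.getElem_cons_drop hj).symm
  · simp [List.length_take]
    omega
  · intro hmem2
    obtain ⟨t, ht, hteq⟩ := List.mem_iff_getElem.mp hmem2
    have htj : t < j := by
      simp [List.length_take] at ht
      omega
    have h3 := hfirst t htj
    rw [hgd, hxj] at h3
    rw [List.getD_eq_getElem xs 0 (by omega : t < xs.length)] at h3
    rw [List.getElem_take] at hteq
    rw [hteq] at h3
    exact lt_irrefl _ h3

-- ===== B-side: the memo invariant =====

-- every cached value is the DP cell value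
def MemoOK (Pc Tc : List Char) (memo : PySem.Dict (Nat × Nat) Int) : Prop :=
  ∀ a b v, memo.get? (a, b) = some v → v = edCell Pc Tc a b

lemma memoOK_insert (Pc Tc : List Char) (memo : PySem.Dict (Nat × Nat) Int)
    (i j : Nat) (v : Int) (h : MemoOK Pc Tc memo) (hv : v = edCell Pc Tc i j) :
    MemoOK Pc Tc (memo.insert (i, j) v) := by
  intro a b w hw
  rw [PySem.Dict.get?_insert] at hw
  split_ifs at hw with hk
  · cases hw
    cases hk
    exact hv
  · exact h a b w hw

lemma editMemo_spec (Pc Tc : List Char) :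
    ∀ N i j (memo : PySem.Dict (Nat × Nat) Int), i + j ≤ N → MemoOK Pc Tc memo →
      (editMemo Pc Tc i j memo).2 = edCell Pc Tc i j ∧
      MemoOK Pc Tc (editMemo Pc Tc i j memo).1 := by
  intro N
  induction N with
  | zero =>
      intro i j memo hN hm
      have hi : i = 0 := by omega
      have hj : j = 0 := by omega
      subst hi; subst hj
      rw [editMemo]
      cases h : memo.get? (0, 0) with
      | some r =>
          simp only
          exact ⟨(hm 0 0 r h).symm ▸ (hm 0 0 r h), hm⟩
      | none =>
          exact ⟨(edCell_zero Pc Tc 0).symm,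
            memoOK_insert Pc Tc memo 0 0 0 hm (edCell_zero Pc Tc 0).symm⟩
  | succ N ih =>
      intro i j memo hN hm
      rw [editMemo]
      cases h : memo.get? (i, j) with
      | some r =>
          simp only
          exact ⟨hm i j r h, hm⟩
      | none =>
          by_cases hi : i = 0
          · subst hi
            exact ⟨(edCell_zero Pc Tc j).symm,
              memoOK_insert Pc Tc memo 0 j 0 hm (edCell_zero Pc Tc j).symm⟩
          · by_cases hj : j = 0
            · subst hj
              simp only [dif_neg hi]
              have hcell : (i : Int) = edCell Pc Tc i 0 := by
                obtain ⟨i', rfl⟩ : ∃ i', i = i' + 1 := ⟨i - 1, by omega⟩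
                rw [edCell_base]
                push_cast
                ring
              exact ⟨hcell, memoOK_insert Pc Tc memo i 0 (i : Int) hm hcell⟩
            · simp only [dif_neg hi, dif_neg hj]
              obtain ⟨e1, m1⟩ := ih (i-1) (j-1) memo (by omega) hm
              obtain ⟨e2, m2⟩ := ih i (j-1) (editMemo Pc Tc (i-1) (j-1) memo).1 (by omega) m1
              obtain ⟨e3, m3⟩ := ih (i-1) j (editMemo Pc Tc i (j-1)
                (editMemo Pc Tc (i-1) (j-1) memo).1).1 (by omega) m2
              rw [e1, e2, e3]
              have hval := (edCell_eq_min Pc Tc i j (by omega) (by omega)).symm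
              exact ⟨hval, memoOK_insert Pc Tc _ i j _ m3 hval⟩

lemma L_lastB (Pc Tc : List Char) (m : Nat) :
    ∀ n (memo : PySem.Dict (Nat × Nat) Int) (acc : List Int), MemoOK Pc Tc memo →
      ((List.range n).foldl
        (fun st k =>
          let p := editMemo Pc Tc m k st.1
          (p.1, st.2 ++ [p.2])) (memo, acc)).2
        = acc ++ (List.range n).map (fun j => edCell Pc Tc m j) ∧
      MemoOK Pc Tc (((List.range n).foldl
        (fun st k =>
          let p := editMemo Pc Tc m k st.1
          (p.1, st.2 ++ [p.2])) (memo, acc)).1) := by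
  intro n
  induction n with
  | zero =>
      intro memo acc hm
      simp [hm]
  | succ n ih =>
      intro memo acc hm
      rw [List.range_succ, List.foldl_append]
      obtain ⟨hsnd, hfst⟩ := ih memo acc hm
      obtain ⟨he, hmOK⟩ := editMemo_spec Pc Tc (m + n) m n
        (((List.range n).foldl (fun st k =>
          let p := editMemo Pc Tc m k st.1
          (p.1, st.2 ++ [p.2])) (memo, acc)).1) (le_refl _) hfst
      simp only [List.foldl_cons, List.foldl_nil]
      constructor
      · rw [hsnd, he, List.map_append]
        simp
      · exact hmOK

lemma memoOK_empty (Pc Tc : List Char) :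
    MemoOK Pc Tc (PySem.Dict.empty : PySem.Dict (Nat × Nat) Int) := by
  intro a b v hv
  rw [PySem.Dict.get?_empty] at hv
  cases hv

lemma core (Pc Tc : List Char) (hm : Pc ≠ []) (hn : Tc ≠ []) : Abody Pc Tc = Bbody Pc Tc := by
  have hm : 1 ≤ Pc.length := List.length_pos_of_ne_nil hm
  have hn : 1 ≤ Tc.length := List.length_pos_of_ne_nil hn
  unfold Abody Bbody
  dsimp only
  have hD0 : (PySem.List.pyRange 0 ((Pc.length : Nat) : Int) 1).map
      (fun _ => (PySem.List.pyRange 0 ((Tc.length : Nat) : Int) 1).map (fun _ => (0:Int)))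
      = List.replicate Pc.length (List.replicate Tc.length 0) := by
    rw [PySem.List.pyRange_zero_nat, PySem.List.pyRange_zero_nat]
    rw [List.map_const', List.map_const']
    simp
  rw [hD0]
  rw [L_init Pc.length Tc.length Pc.length (le_refl _), L_rowsA0 Pc Tc Pc.length Tc.length]
  rw [L_outerA Pc Tc Pc.length Tc.length hn Pc.length hm (le_refl _)]
  have hrow : PySem.List.pyGetD (rowsA Pc Tc Pc.length Tc.length (Pc.length - 1))
      ((Pc.length : Int) - 1) [] = edRow Pc Tc (Pc.length - 1) Tc.length := by
    rw [show ((Pc.length : Int) - 1) = ((Pc.length - 1 : Nat) : Int) from by omega]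
    rw [PySem.List.pyGetD_natCast]
    unfold rowsA
    rw [PySem.List.getD_map_range _ _ _ _ (show Pc.length - 1 < Pc.length by omega)]
    simp
  simp only [hrow]
  -- B side: the memoized fold produces the last DP row
  obtain ⟨hlast, _⟩ := L_lastB Pc Tc (Pc.length - 1) Tc.length PySem.Dict.empty []
    (memoOK_empty Pc Tc)
  rw [hlast]
  simp only [List.nil_append]
  rw [show (List.range Tc.length).map (fun j => edCell Pc Tc (Pc.length - 1) j)
      = edRow Pc Tc (Pc.length - 1) Tc.length from rfl]
  -- argmin vs index-of-min
  obtain ⟨j, hfold, hjn, hle, hlt⟩ :=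
    L_argmin (edRow Pc Tc (Pc.length - 1) Tc.length) Tc.length hn
      (by rw [length_edRow])
  rw [hfold]
  have hidx := L_index (edRow Pc Tc (Pc.length - 1) Tc.length) j
    (by rw [length_edRow]; exact hjn)
    (by intro t ht; rw [length_edRow] at ht; exact hle t ht)
    hlt
  rw [hidx]
  simp only [Option.getD_some]
  omega

-- ===== VERDICT (by name: the statement is the Claim_ definition above) =====
theorem fit_substring_spec : Claim_equal_fit_substring := by
  intro P T _ hpre
  unfold Spec_fit_substring
  rw [fitA, fitB]
  apply core
  · split <;> simp [hpre.1]
  · split <;> simp [hpre.2]
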